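-- pv_equiv track=rewrite | github.com/yana-safonova/ig_repertoire_constructor | py/utils/files_utils.py | remove_extension
-- ===== SOURCE A (Python) =====
-- def remove_extension(s):
--     arr = s.split('.')
--     if len(arr) < 2:
--         return s
--     s = ''
--     for i in range(len(arr) - 2):
--         s += arr[i] + '.'
--     s += arr[-2]
--     return s
-- ===== SOURCE B (Python) =====
-- def remove_extension(s):
--     if '.' not in s:
--         return s
--     return s[:s.rfind('.')]
-- ===== Notes on version B (the rewrite author's own statement) =====
-- stated objective: idiomatic
-- what changed: Instead of splitting the string into all dot-separated segments and rejoining every piece but the last in a quadratic concatenation loop, B locates the last dot with rfind and returns a single slice before it (guarding the no-dot case).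
import Mathlib
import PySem

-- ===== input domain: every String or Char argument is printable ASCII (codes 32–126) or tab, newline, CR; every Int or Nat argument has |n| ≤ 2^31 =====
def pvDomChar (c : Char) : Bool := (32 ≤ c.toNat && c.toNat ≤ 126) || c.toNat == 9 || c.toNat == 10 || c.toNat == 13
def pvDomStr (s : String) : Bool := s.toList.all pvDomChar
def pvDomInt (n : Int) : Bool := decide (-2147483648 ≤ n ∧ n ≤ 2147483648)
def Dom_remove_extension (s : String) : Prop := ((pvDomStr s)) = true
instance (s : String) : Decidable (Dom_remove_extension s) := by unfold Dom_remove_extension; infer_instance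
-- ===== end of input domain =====

-- B replaces A's split-all-segments-and-rejoin loop by a guard plus one slice before the last dot (idiomatic rewrite).


-- ===== PORT A =====
-- arr = s.split('.'); if len(arr) < 2: return s; then rebuild all but the last segment with '.' separators
def remove_extension (s : String) : String :=
  let arr := PySem.Chars.splitOn s.toList ['.']
  if arr.length < 2 then s
  else
    let t := (PySem.List.pyRange 0 ((arr.length : Int) - 2) 1).foldl
      (fun acc i => acc ++ PySem.List.pyGetD arr i [] ++ ['.']) ([] : List Char)
    String.ofList (t ++ PySem.List.pyGetD arr (-2) [])

-- ===== PORT B =====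
-- if '.' not in s: return s; else return s[:s.rfind('.')]
def remove_extension_alt (s : String) : String :=
  if PySem.Chars.isIn ['.'] s.toList = false then s
  else String.ofList (PySem.List.slice s.toList none (some (PySem.Chars.rfind s.toList ['.'])))

-- ===== PRECONDITION & SPEC =====
def Spec_remove_extension (s : String) (out : String) : Prop := out = remove_extension_alt s
instance (s : String) (out : String) : Decidable (Spec_remove_extension s out) := by unfold Spec_remove_extension; infer_instance

-- ===== CLAIM (what is proved, stated in full; the proofs are below) =====
def Claim_equal_remove_extension : Prop := ∀ (s : String), Dom_remove_extension s → Spec_remove_extension s (remove_extension s)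

-- ===== LEMMAS AND PROOFS =====

/-- Clean structural model of `s.split('.')`. -/
def splitDot : List Char → List (List Char)
  | [] => [[]]
  | c :: cs => if c = '.' then [] :: splitDot cs else (splitDot cs).modifyHead (c :: ·)

theorem splitDot_ne_nil (cs : List Char) : splitDot cs ≠ [] := by
  induction cs with
  | nil => simp [splitDot]
  | cons c cs ih =>
    simp only [splitDot]
    split_ifs
    · simp
    · cases h : splitDot cs with
      | nil => exact absurd h ih
      | cons p t => simp

theorem splitOn_go_splitDot : ∀ (fuel : Nat) (l cur : List Char) (acc : List (List Char)),
    l.length ≤ fuel →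
    PySem.Chars.splitOn.go ['.'] fuel l cur acc
      = acc.reverse ++ (splitDot l).modifyHead (cur.reverse ++ ·) := by
  intro fuel
  induction fuel with
  | zero =>
    intro l cur acc h
    have : l = [] := by cases l <;> simp_all
    subst this
    simp [PySem.Chars.splitOn.go, splitDot]
  | succ fuel ih =>
    intro l cur acc h
    cases l with
    | nil => simp [PySem.Chars.splitOn.go, splitDot]
    | cons c rest =>
      rw [PySem.Chars.splitOn.go]
      by_cases hc : c = '.'
      · subst hc
        simp only [List.isPrefixOf, beq_self_eq_true, Bool.true_and, if_pos,
          List.length_cons, List.length_nil, List.drop_succ_cons, List.drop_zero]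
        rw [ih rest [] (cur.reverse :: acc) (by simpa using h)]
        cases hs : splitDot rest with
        | nil => exact absurd hs (splitDot_ne_nil rest)
        | cons p t => simp [splitDot, hs]
      · have hpre : (['.'].isPrefixOf (c :: rest)) = false := by
          simp [List.isPrefixOf]
          exact fun h' => absurd h'.symm hc
        rw [hpre]
        simp only [Bool.false_eq_true, if_false]
        rw [ih rest (c :: cur) acc (by simpa using h)]
        cases hs : splitDot rest with
        | nil => exact absurd hs (splitDot_ne_nil rest)
        | cons p t => simp [splitDot, hc, hs]

theorem splitOn_eq_splitDot (cs : List Char) :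
    PySem.Chars.splitOn cs ['.'] = splitDot cs := by
  have h2 : List.modifyHead (fun x => x) (splitDot cs) = splitDot cs := by
    cases hs : splitDot cs <;> simp
  have := splitOn_go_splitDot (cs.length + 1) cs [] [] (by omega)
  simpa [PySem.Chars.splitOn, h2] using this

theorem splitDot_of_not_mem {cs : List Char} (h : '.' ∉ cs) : splitDot cs = [cs] := by
  induction cs with
  | nil => simp [splitDot]
  | cons c cs ih =>
    simp only [List.mem_cons, not_or] at h
    simp [splitDot, Ne.symm h.1, ih h.2]

theorem splitDot_append (u w : List Char) :
    splitDot (u ++ '.' :: w) = splitDot u ++ splitDot w := by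
  induction u with
  | nil => simp [splitDot]
  | cons c u ih =>
    by_cases hc : c = '.'
    · subst hc; simp [splitDot, ih]
    · simp only [List.cons_append, splitDot, if_neg hc, ih]
      cases hs : splitDot u with
      | nil => exact absurd hs (splitDot_ne_nil u)
      | cons p t => simp

/-- `'.'.join(ps)` for the pieces list. -/
def intercal : List (List Char) → List Char
  | [] => []
  | [p] => p
  | p :: ps => p ++ '.' :: intercal ps

theorem foldl_dropLast_intercal : ∀ (ps : List (List Char)) (init : List Char) (h : ps ≠ []),
    ps.dropLast.foldl (fun a p => a ++ p ++ ['.']) init ++ ps.getLast h = init ++ intercal ps := by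
  intro ps
  induction ps with
  | nil => intro _ h; exact absurd rfl h
  | cons p ps ih =>
    intro init _
    cases ps with
    | nil => simp [intercal]
    | cons q qs =>
      rw [List.getLast_cons (by simp), List.dropLast_cons₂, List.foldl_cons,
        ih (init ++ p ++ ['.']) (by simp)]
      simp [intercal]

theorem intercal_splitDot (u : List Char) : intercal (splitDot u) = u := by
  induction u with
  | nil => simp [splitDot, intercal]
  | cons c u ih =>
    by_cases hc : c = '.'
    · subst hc
      simp only [splitDot, if_pos]
      cases hs : splitDot u with
      | nil => exact absurd hs (splitDot_ne_nil u)
      | cons p t => rw [hs] at ih; simp [intercal, ih]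
    · simp only [splitDot, if_neg hc]
      cases hs : splitDot u with
      | nil => exact absurd hs (splitDot_ne_nil u)
      | cons p t =>
        rw [hs] at ih
        cases t with
        | nil => simp_all [intercal]
        | cons r rs => simp_all [intercal]

theorem last_dot_decomp {cs : List Char} (h : '.' ∈ cs) :
    ∃ u v, cs = u ++ '.' :: v ∧ '.' ∉ v := by
  induction cs with
  | nil => cases h
  | cons c cs ih =>
    by_cases hm : '.' ∈ cs
    · obtain ⟨u, v, rfl, hv⟩ := ih hm
      exact ⟨c :: u, v, rfl, hv⟩
    · have hc : c = '.' := by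
        rcases List.mem_cons.mp h with h' | h'
        · exact h'.symm
        · exact absurd h' hm
      exact ⟨[], cs, by simp [hc], hm⟩

theorem rfind_go_last {u v : List Char} (hv : '.' ∉ v) :
    ∀ j, u.length ≤ j → j ≤ u.length + 1 + v.length →
      PySem.Chars.rfind.go (u ++ '.' :: v) ['.'] j = (u.length : Int) := by
  intro j
  induction j with
  | zero =>
    intro h1 _
    have hu : u = [] := by cases u <;> simp_all
    subst hu
    simp [PySem.Chars.rfind.go, List.isPrefixOf]
  | succ j ih =>
    intro h1 h2
    rw [PySem.Chars.rfind.go]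
    by_cases he : j + 1 = u.length
    · have hd : (u ++ '.' :: v).drop (j + 1) = '.' :: v := by
        rw [List.drop_append, he]
        simp
      rw [hd]
      simp [List.isPrefixOf, he]
    · have hgt : u.length < j + 1 := by omega
      have hd : (u ++ '.' :: v).drop (j + 1) = v.drop (j - u.length) := by
        rw [List.drop_append, List.drop_eq_nil_of_le (by omega)]
        have : j + 1 - u.length = (j - u.length) + 1 := by omega
        simp [this]
      have hpre : (['.'].isPrefixOf ((u ++ '.' :: v).drop (j + 1))) = false := by
        rw [hd]
        cases hdd : v.drop (j - u.length) with
        | nil => simp [List.isPrefixOf]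
        | cons a t =>
          have ha : a ∈ v := List.mem_of_mem_drop (by rw [hdd]; simp)
          simp [List.isPrefixOf]
          intro e
          exact hv (e ▸ ha)
      rw [hpre]
      simp only [Bool.false_eq_true, if_false]
      exact ih (by omega) (by omega)

theorem rfind_last {u v : List Char} (hv : '.' ∉ v) :
    PySem.Chars.rfind (u ++ '.' :: v) ['.'] = (u.length : Int) := by
  have := rfind_go_last (u := u) hv ((u ++ '.' :: v).length)
    (by simp only [List.length_append, List.length_cons]; omega)
    (by simp only [List.length_append, List.length_cons]; omega)
  simpa [PySem.Chars.rfind] using this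

theorem isIn_dot (cs : List Char) : PySem.Chars.isIn ['.'] cs = true ↔ '.' ∈ cs := by
  rw [PySem.Chars.isIn_iff_infix, List.singleton_infix_iff]

theorem arr_neg_two {ps : List (List Char)} (v : List Char) (h : ps ≠ []) :
    PySem.List.pyGetD (ps ++ [v]) (-2) [] = ps.getLast h := by
  have hlen : (ps ++ [v]).length = ps.length + 1 := by simp
  have hge : 0 < ps.length := List.length_pos_iff.mpr h
  simp only [PySem.List.pyGetD, PySem.List.pyGet?, PySem.List.pyIdx?, hlen]
  have h2 : ¬ (0:Int) ≤ -2 := by norm_num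
  rw [if_neg h2, if_pos (by push_cast; omega)]
  have : ps.length + 1 - (-(-2:Int)).toNat = ps.length - 1 := by
    omega
  rw [this]
  simp only [Option.bind_some]
  rw [List.getElem?_append_left (by omega)]
  rw [List.getLast_eq_getElem]
  simp [List.getElem?_eq_getElem (by omega : ps.length - 1 < ps.length)]

theorem foldl_take_prefix (ps : List (List Char)) (v : List Char) (h : ps ≠ []) :
    (PySem.List.pyRange 0 (((ps ++ [v]).length : Int) - 2) 1).foldl
      (fun acc i => acc ++ PySem.List.pyGetD (ps ++ [v]) i [] ++ ['.']) ([] : List Char)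
    = ps.dropLast.foldl (fun a p => a ++ p ++ ['.']) [] := by
  have hge : 0 < ps.length := List.length_pos_iff.mpr h
  have hm : (((ps ++ [v]).length : Int) - 2) = ((ps.dropLast.length : Nat) : Int) := by
    simp [List.length_dropLast]
    omega
  rw [hm]
  have hcong : ∀ (acc : List Char), ∀ i ∈ PySem.List.pyRange 0 ((ps.dropLast.length : Nat) : Int) 1,
      acc ++ PySem.List.pyGetD (ps ++ [v]) i [] ++ ['.']
        = acc ++ PySem.List.pyGetD ps.dropLast i [] ++ ['.'] := by
    intro acc i hi
    rw [PySem.List.mem_pyRange_one] at hi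
    have h0 : 0 ≤ i := hi.1
    have hlt : i.toNat < ps.dropLast.length := by omega
    rw [PySem.List.pyGetD_of_nonneg _ _ h0, PySem.List.pyGetD_of_nonneg _ _ h0]
    have harr : ps ++ [v] = ps.dropLast ++ (ps.getLast h :: [v]) := by
      conv_lhs => rw [← List.dropLast_append_getLast h]
      simp
    rw [harr, List.getD_append _ _ _ _ hlt]
  rw [PySem.List.foldl_congr_mem _ _ _ _ hcong]
  have := PySem.List.foldl_pyRange_zero_pyGetD ps.dropLast ([] : List Char)
    (fun a p => a ++ p ++ ['.']) ([] : List Char)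
  simpa [PySem.List.len] using this

-- ===== VERDICT (by name: the statement is the Claim_ definition above) =====
theorem remove_extension_spec : Claim_equal_remove_extension := by
  intro s _
  unfold Spec_remove_extension remove_extension remove_extension_alt
  simp only [splitOn_eq_splitDot]
  by_cases hm : '.' ∈ s.toList
  · obtain ⟨u, v, hcs, hv⟩ := last_dot_decomp hm
    have hsplit : splitDot s.toList = splitDot u ++ [v] := by
      rw [hcs, splitDot_append, splitDot_of_not_mem hv]
    have hne : splitDot u ≠ [] := splitDot_ne_nil u
    have hlen2 : ¬ (splitDot s.toList).length < 2 := by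
      rw [hsplit]
      have := List.length_pos_iff.mpr hne
      simp
      omega
    rw [if_neg hlen2, if_neg (by simp [isIn_dot, hm])]
    congr 1
    rw [hsplit, foldl_take_prefix _ _ hne, arr_neg_two v hne,
      foldl_dropLast_intercal _ _ hne, intercal_splitDot]
    rw [hcs, rfind_last hv, PySem.List.slice_to _ (by positivity)]
    simp [List.take_left']
  · have hsp : splitDot s.toList = [s.toList] := splitDot_of_not_mem hm
    rw [hsp, if_pos (by simp), if_pos (by simp [← Bool.not_eq_true, isIn_dot, hm])]
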